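-- pv_equiv track=rewrite | github.com/dnCRevelation/SoftwareDev-Portfolio-and-Projects | HackerRank-PersonalWork/04 - Sets/Sets_TheCaptainsRoomSolution.py | captain_seeker
-- ===== SOURCE A (Python) =====
-- def captain_seeker(k, rooms):
--     rooms.sort()
--     for i in range(0, len(rooms), k):
--         if i == len(rooms) - 1:
--             return rooms[i]
--         elif rooms[i] != rooms[i + 1]:
--             return rooms[i]
--     return -1
-- ===== SOURCE B (Python) =====
-- from itertools import groupby
--
--
-- def captain_seeker(k, rooms):
--     # Sort (same in-place side effect as A), then walk the runs of equal
--     # values: A's stride-k scan returns the value of the first run whose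
--     # last index is a multiple of k, so track run end-indices directly.
--     rooms.sort()
--     end = -1
--     for v, g in groupby(rooms):
--         end += sum(1 for _ in g)
--         if end % k == 0:
--             return v
--     return -1
-- ===== Notes on version B (the rewrite author's own statement) =====
-- stated objective: alternative
-- what changed: B replaces A's stride-k index scan over the sorted list by a single pass over the runs of equal values (itertools.groupby), returning the value of the first run whose last index is a multiple of k; Pre_ restricts k to the natural domain k >= 1 (k = 0 makes A raise ValueError, and a non-positive group size is outside the task's domain).
-- outside the precondition, e.g. on captain_seeker(-1, [1]): A returns -1, B returns 1
import Mathlib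
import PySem

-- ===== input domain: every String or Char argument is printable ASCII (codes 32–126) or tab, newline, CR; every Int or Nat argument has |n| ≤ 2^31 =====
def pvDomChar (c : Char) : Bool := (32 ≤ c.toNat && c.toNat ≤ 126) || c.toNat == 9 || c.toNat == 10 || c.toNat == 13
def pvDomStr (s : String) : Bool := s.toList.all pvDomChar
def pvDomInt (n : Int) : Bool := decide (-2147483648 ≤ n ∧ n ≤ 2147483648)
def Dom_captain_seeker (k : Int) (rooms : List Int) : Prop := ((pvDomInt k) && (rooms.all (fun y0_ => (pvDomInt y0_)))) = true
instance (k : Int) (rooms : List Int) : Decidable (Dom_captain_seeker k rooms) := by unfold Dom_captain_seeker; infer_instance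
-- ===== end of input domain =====

-- B replaces A's stride-k index scan by a single pass over the runs of equal values
-- (same O(n log n) cost; 'alternative'); both sort in place — equivalence is about the return value.

-- ===== PORT A =====
-- A's for-loop over range(0, len(rooms), k) with early returns, as recursion over the index list.
def pvAGo (rs : List Int) : List Int → Int
  | [] => -1
  | i :: rest =>
    if i = (rs.length : Int) - 1 then (PySem.List.pyGet? rs i).getD 0
    else if PySem.List.pyGet? rs i ≠ PySem.List.pyGet? rs (i + 1) then (PySem.List.pyGet? rs i).getD 0
    else pvAGo rs rest

def captain_seeker (k : Int) (rooms : List Int) : Int :=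
  let rs := PySem.List.sorted rooms (fun x => x) false
  pvAGo rs (PySem.List.pyRange 0 (rs.length : Int) k)

-- ===== PORT B =====
-- itertools.groupby over the sorted list: consecutive runs as (value, length) pairs.
def pvRuns : List Int → List (Int × Int)
  | [] => []
  | x :: xs =>
    match pvRuns xs with
    | [] => [(x, 1)]
    | (v, c) :: rest => if x = v then (x, c + 1) :: rest else (x, 1) :: (v, c) :: rest

-- Source B's loop: end-index accumulator over the runs, return v when end % k == 0.
def pvBGo (k : Int) : Int → List (Int × Int) → Int
  | _, [] => -1
  | e, (v, c) :: rest =>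
    let e' := e + c
    if PySem.Int.mod e' k = 0 then v else pvBGo k e' rest

def captain_seeker_alt (k : Int) (rooms : List Int) : Int :=
  pvBGo k (-1) (pvRuns (PySem.List.sorted rooms (fun x => x) false))

-- ===== PRECONDITION & SPEC =====
-- Pre_ restricts k to the task's natural domain: k = 0 makes A raise ValueError (range step 0),
-- and for k < 0 (a meaningless group size, outside the task) A's empty loop returns -1 while B does not.
def Pre_captain_seeker (k : Int) (_rooms : List Int) : Prop := 1 ≤ k
instance (k : Int) (rooms : List Int) : Decidable (Pre_captain_seeker k rooms) := by unfold Pre_captain_seeker; infer_instance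
def pvWitness_captain_seeker : Int × List Int := (2, [1, 2, 1])

def Spec_captain_seeker (k : Int) (rooms : List Int) (out : Int) : Prop := out = captain_seeker_alt k rooms
instance (k : Int) (rooms : List Int) (out : Int) : Decidable (Spec_captain_seeker k rooms out) := by unfold Spec_captain_seeker; infer_instance

-- ===== CLAIM (what is proved, stated in full; the proofs are below) =====
def Claim_equal_captain_seeker : Prop := ∀ (k : Int) (rooms : List Int), Dom_captain_seeker k rooms → Pre_captain_seeker k rooms → Spec_captain_seeker k rooms (captain_seeker k rooms)

-- ===== LEMMAS AND PROOFS =====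

-- common reference: walk the list position by position; return x at the first position p that
-- ends a run (next differs, or last) and has p % k == 0.
def pvWalk (k : Int) : Int → List Int → Int
  | _, [] => -1
  | p, [x] => if PySem.Int.mod p k = 0 then x else -1
  | p, x :: y :: xs => if x ≠ y ∧ PySem.Int.mod p k = 0 then x else pvWalk k (p + 1) (y :: xs)

theorem pvRuns_cons_eq (x : Int) (xs : List Int) :
    pvRuns (x :: xs) = match pvRuns xs with
      | [] => [(x, 1)]
      | (v, c) :: rest => if x = v then (x, c + 1) :: rest else (x, 1) :: (v, c) :: rest := rfl

theorem pvRuns_head (y : Int) (ys : List Int) : ∃ c rest, pvRuns (y :: ys) = (y, c) :: rest := by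
  rcases h : pvRuns ys with _ | ⟨⟨v, c⟩, rest⟩
  · exact ⟨1, [], by rw [pvRuns_cons_eq, h]⟩
  · by_cases hy : y = v
    · subst hy
      exact ⟨c + 1, rest, by rw [pvRuns_cons_eq, h]; simp⟩
    · exact ⟨1, (v, c) :: rest, by rw [pvRuns_cons_eq, h]; simp [hy]⟩

theorem pvBGo_walk (k : Int) (xs : List Int) : ∀ e : Int, pvBGo k e (pvRuns xs) = pvWalk k (e + 1) xs := by
  induction xs with
  | nil => intro e; simp [pvRuns, pvBGo, pvWalk]
  | cons x xs ih =>
    intro e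
    cases xs with
    | nil => simp [pvRuns, pvBGo, pvWalk]
    | cons y ys =>
      obtain ⟨c, rest, hr⟩ := pvRuns_head y ys
      have h2 := ih (e + 1)
      rw [hr] at h2
      by_cases hxy : x = y
      · subst hxy
        have hrx : pvRuns (x :: x :: ys) = (x, c + 1) :: rest := by
          rw [pvRuns_cons_eq, hr]; simp
        rw [hrx]
        have hw : pvWalk k (e + 1) (x :: x :: ys) = pvWalk k (e + 1 + 1) (x :: ys) := by
          simp only [pvWalk]; simp
        rw [hw, ← h2]
        simp only [pvBGo]
        rw [show e + (c + 1) = e + 1 + c by ring]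
      · have hrx : pvRuns (x :: y :: ys) = (x, 1) :: (y, c) :: rest := by
          rw [pvRuns_cons_eq, hr]; simp [hxy]
        rw [hrx]
        have hw : pvWalk k (e + 1) (x :: y :: ys) =
            if x ≠ y ∧ PySem.Int.mod (e + 1) k = 0 then x else pvWalk k (e + 1 + 1) (y :: ys) := by
          simp only [pvWalk]
        rw [hw, ← h2]
        simp only [pvBGo]
        by_cases hm : PySem.Int.mod (e + 1) k = 0
        · simp [hm, hxy]
        · simp [hm]

-- pyRange with a positive step, in cons form
theorem pyRange_pos_nil (a b k : Int) (hk : 0 < k) (h : b ≤ a) : PySem.List.pyRange a b k = [] := by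
  rw [PySem.List.pyRange_of_pos a b hk, if_neg (by omega)]
  simp

theorem pyRange_pos_cons (a b k : Int) (hk : 0 < k) (h : a < b) :
    PySem.List.pyRange a b k = a :: PySem.List.pyRange (a + k) b k := by
  rw [PySem.List.pyRange_of_pos a b hk, PySem.List.pyRange_of_pos (a + k) b hk]
  have hkne : k ≠ 0 := by omega
  have hcount : (b - a + k - 1) / k = (b - a - 1) / k + 1 := by
    rw [show b - a + k - 1 = (b - a - 1) + 1 * k by ring, Int.add_mul_ediv_right _ _ hkne]
  have hnn : 0 ≤ (b - a - 1) / k := Int.ediv_nonneg (by omega) (by omega)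
  have hM : (if a + k < b then ((b - (a + k) + k - 1) / k).toNat else 0) = ((b - a - 1) / k).toNat := by
    by_cases h2 : a + k < b
    · rw [if_pos h2, show b - (a + k) + k - 1 = b - a - 1 by ring]
    · rw [if_neg h2]
      have : (b - a - 1) / k = 0 := Int.ediv_eq_zero_of_lt (by omega) (by omega)
      simp [this]
  rw [if_pos h, hM, hcount]
  rw [show ((b - a - 1) / k + 1).toNat = ((b - a - 1) / k).toNat + 1 by omega]
  rw [List.range_succ_eq_map]
  simp only [List.map_cons, List.map_map]
  congr 1
  · simp
  · apply List.map_congr_left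
    intro i _
    simp [Function.comp, Nat.succ_eq_add_one]
    ring

-- skipping one position whose index is not a multiple of k
theorem pvWalk_skip_one (k : Int) (rs : List Int) (p : Nat)
    (hm : PySem.Int.mod (p : Int) k ≠ 0) :
    pvWalk k (p : Int) (rs.drop p) = pvWalk k ((p : Int) + 1) (rs.drop (p + 1)) := by
  have hdd : rs.drop (p + 1) = List.drop 1 (rs.drop p) := by rw [List.drop_drop]
  rcases hd : rs.drop p with _ | ⟨x, t⟩
  · have : rs.drop (p + 1) = [] := by rw [hdd, hd]; rfl
    rw [this, pvWalk, pvWalk]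
  · have ht : rs.drop (p + 1) = t := by rw [hdd, hd]; rfl
    rw [ht]
    cases t with
    | nil => simp [pvWalk, hm]
    | cons y u => simp [pvWalk, hm]

theorem pvWalk_skip (k : Int) (rs : List Int) :
    ∀ (m p : Nat), (∀ i : Nat, i < m → PySem.Int.mod ((p + i : Nat) : Int) k ≠ 0) →
    pvWalk k (p : Int) (rs.drop p) = pvWalk k ((p + m : Nat) : Int) (rs.drop (p + m)) := by
  intro m
  induction m with
  | zero => intro p _; simp
  | succ m ih =>
    intro p h
    have h0 : PySem.Int.mod ((p : Nat) : Int) k ≠ 0 := by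
      have := h 0 (by omega)
      simpa using this
    rw [pvWalk_skip_one k rs p h0]
    have := ih (p + 1) (by
      intro i hi
      have := h (i + 1) (by omega)
      rw [show p + 1 + i = p + (i + 1) by omega]
      exact this)
    rw [show ((p : Int) + 1) = ((p + 1 : Nat) : Int) by push_cast; ring, this,
      show p + 1 + m = p + (m + 1) by omega]

-- A's stride-k scan equals the walk, at any aligned start
theorem pvAGo_walk (k : Int) (hk : 1 ≤ k) (rs : List Int) :
    ∀ (n j : Nat), rs.length ≤ j + n → (k ∣ (j : Int)) →
    pvAGo rs (PySem.List.pyRange (j : Int) (rs.length : Int) k) = pvWalk k (j : Int) (rs.drop j) := by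
  intro n
  induction n with
  | zero =>
    intro j hle _
    rw [pyRange_pos_nil _ _ _ (by omega) (by exact_mod_cast by omega)]
    rw [List.drop_eq_nil_of_le (by omega)]
    rfl
  | succ n ih =>
    intro j hle hdvd
    by_cases hjn : rs.length ≤ j
    · rw [pyRange_pos_nil _ _ _ (by omega) (by exact_mod_cast hjn)]
      rw [List.drop_eq_nil_of_le hjn]
      rfl
    · rw [not_le] at hjn
      rw [pyRange_pos_cons _ _ _ (by omega) (by exact_mod_cast hjn)]
      have hmod0 : PySem.Int.mod (j : Int) k = 0 := (PySem.Int.mod_eq_zero_iff_dvd _ _).mpr hdvd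
      have hget : PySem.List.pyGet? rs (j : Int) = some rs[j] := by
        rw [PySem.List.pyGet?_natCast, List.getElem?_eq_getElem hjn]
      rw [List.drop_eq_getElem_cons hjn]
      by_cases hlast : j = rs.length - 1
      · -- last index: A returns rs[j]; the dropped tail is the singleton [rs[j]]
        have hdone : rs.drop (j + 1) = [] := List.drop_eq_nil_of_le (by omega)
        rw [hdone]
        simp only [pvAGo, pvWalk]
        rw [if_pos (by omega : (j : Int) = (rs.length : Int) - 1), hget]
        simp [hmod0]
      · have hj1 : j + 1 < rs.length := by omega
        have hget1 : PySem.List.pyGet? rs ((j : Int) + 1) = some rs[j + 1] := by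
          rw [show (j : Int) + 1 = ((j + 1 : Nat) : Int) by push_cast; ring,
            PySem.List.pyGet?_natCast, List.getElem?_eq_getElem hj1]
        rw [List.drop_eq_getElem_cons hj1]
        simp only [pvAGo, pvWalk]
        rw [if_neg (by omega : ¬ ((j : Int) = (rs.length : Int) - 1)), hget, hget1]
        by_cases hne : rs[j] ≠ rs[j + 1]
        · rw [if_pos (by simpa using hne), if_pos ⟨hne, hmod0⟩]
          rfl
        · rw [not_not] at hne
          rw [if_neg (by simpa using hne), if_neg (by simp [hne])]
          -- A jumps to j + k, the walk skips positions j+1 … j+k-1 (none is a multiple of k)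
          have hkpos : 0 < k := by omega
          have hkN : ((k.toNat : Int)) = k := Int.toNat_of_nonneg (by omega)
          have hskip := pvWalk_skip k rs (k.toNat - 1) (j + 1) (by
            intro i hi
            simp only [ne_eq, PySem.Int.mod_eq_zero_iff_dvd]
            intro hd
            have h3 : ((j + 1 + i : Nat) : Int) = (j : Int) + ((1 + i : Nat) : Int) := by
              push_cast; ring
            rw [h3] at hd
            have hd2 : k ∣ ((1 + i : Nat) : Int) := (Int.dvd_add_right hdvd).mp hd
            have hle := Int.le_of_dvd (by omega) hd2
            omega)
          have harith : (j + 1) + (k.toNat - 1) = j + k.toNat := by omega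
          rw [← List.drop_eq_getElem_cons hj1,
            show ((j : Int) + 1) = ((j + 1 : Nat) : Int) by push_cast; ring,
            hskip, harith]
          have hcast : ((j + k.toNat : Nat) : Int) = (j : Int) + k := by push_cast [hkN]; ring
          rw [hcast]
          have := ih (j + k.toNat) (by omega) (by
            rw [hcast]
            exact Dvd.dvd.add hdvd ⟨1, by ring⟩)
          rw [hcast] at this
          exact this

-- ===== VERDICT (by name: the statement is the Claim_ definition above) =====
theorem captain_seeker_spec : Claim_equal_captain_seeker := by
  intro k rooms _ hpre
  unfold Pre_captain_seeker at hpre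
  unfold Spec_captain_seeker captain_seeker captain_seeker_alt
  set rs := PySem.List.sorted rooms (fun x => x) false with hrs
  have hA := pvAGo_walk k hpre rs rs.length 0 (by omega) (by simp)
  have hB := pvBGo_walk k rs (-1)
  simp only [Nat.cast_zero, List.drop_zero] at hA
  rw [show (-1 : Int) + 1 = 0 by ring] at hB
  rw [hA, hB]
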